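-- pv_equiv track=rewrite | github.com/PetryakovALeks/Python_Labs | лаб2/2 задание 8 вариант.py | create_latin_english_dict
-- ===== SOURCE A (Python) =====
-- def create_latin_english_dict(english_latin_dict):
--     latin_english_dict = {}
--
--     for english_word, latin_translations in english_latin_dict.items():
--         for latin_word in latin_translations:
--             if latin_word not in latin_english_dict:
--                 latin_english_dict[latin_word] = []
--             latin_english_dict[latin_word].append(english_word)
--
--
--     for latin_word in latin_english_dict:
--         latin_english_dict[latin_word].sort()
--
--
--     sorted_latin_english_dict = dict(sorted(latin_english_dict.items()))
--
--     return sorted_latin_english_dict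
-- ===== SOURCE B (Python) =====
-- def create_latin_english_dict(english_latin_dict):
--     # Flatten to (latin, english) pairs, sort once (latin first, then english),
--     # then a single grouping pass: keys arrive in ascending order and each
--     # value list is appended already in ascending order.
--     pairs = sorted((latin, english)
--                    for english, translations in english_latin_dict.items()
--                    for latin in translations)
--     result = {}
--     for latin, english in pairs:
--         result.setdefault(latin, []).append(english)
--     return result
-- ===== Notes on version B (the rewrite author's own statement) =====
-- stated objective: simpler
-- what changed: Instead of building the inverted dict with membership checks and then sorting every value list and the key order separately, B flattens the input into (latin, english) pairs, sorts that list once (tuple order), and builds the result in a single grouping pass, so keys and value lists come out already in ascending order.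
import Mathlib
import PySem

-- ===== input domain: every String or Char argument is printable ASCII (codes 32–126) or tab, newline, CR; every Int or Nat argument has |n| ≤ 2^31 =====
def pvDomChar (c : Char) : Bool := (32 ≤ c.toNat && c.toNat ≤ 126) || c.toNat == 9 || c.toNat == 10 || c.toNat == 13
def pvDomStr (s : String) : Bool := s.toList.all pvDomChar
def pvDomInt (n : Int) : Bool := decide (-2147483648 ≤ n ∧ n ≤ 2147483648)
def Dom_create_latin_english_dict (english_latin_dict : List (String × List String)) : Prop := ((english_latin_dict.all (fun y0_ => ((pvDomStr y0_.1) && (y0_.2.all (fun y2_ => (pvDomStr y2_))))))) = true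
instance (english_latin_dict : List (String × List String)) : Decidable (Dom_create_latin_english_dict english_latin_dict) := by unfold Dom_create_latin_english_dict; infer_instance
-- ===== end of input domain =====

-- B replaces A's build-dict-then-sort-every-list-then-sort-keys with one global sort of the
-- flattened (latin, english) pairs followed by a single grouping pass (objective: simpler).

-- ===== PORT A =====
def create_latin_english_dict (english_latin_dict : List (String × List String)) : List (String × List String) :=
  -- first loop: invert into a dict, membership test then append
  let d := english_latin_dict.foldl (fun d pr =>
    pr.2.foldl (fun d latin_word =>
      let d := if d.contains latin_word then d else d.insert latin_word ([] : List String)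
      -- latin_english_dict[latin_word].append(english_word)
      d.modify latin_word [] (fun v => v ++ [pr.1])) d) PySem.Dict.empty
  -- second loop: sort each value list in place
  let d2 := d.keys.foldl (fun dd k => dd.modify k [] (fun v => PySem.List.sorted v (fun x => x))) d
  -- dict(sorted(d2.items())): Python sorts the (key, value) tuples; as an assoc list this is the sorted items
  PySem.List.sorted2 d2.items (fun p => p.1) (fun p => p.2)

-- ===== PORT B =====
def create_latin_english_dict_alt (english_latin_dict : List (String × List String)) : List (String × List String) :=
  -- pairs = sorted((latin, english) for english, ts in d.items() for latin in ts)
  let pairs := PySem.List.sorted2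
    (english_latin_dict.flatMap (fun pr => pr.2.map (fun latin => (latin, pr.1))))
    (fun p => p.1) (fun p => p.2)
  -- for latin, english in pairs: result.setdefault(latin, []).append(english)
  let result := pairs.foldl (fun d p => d.modify p.1 [] (fun v => v ++ [p.2])) PySem.Dict.empty
  result.items

-- ===== PRECONDITION & SPEC =====
def Spec_create_latin_english_dict (english_latin_dict : List (String × List String)) (out : List (String × List String)) : Prop := out = create_latin_english_dict_alt english_latin_dict
instance (english_latin_dict : List (String × List String)) (out : List (String × List String)) : Decidable (Spec_create_latin_english_dict english_latin_dict out) := by unfold Spec_create_latin_english_dict; infer_instance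

-- ===== CLAIM (what is proved, stated in full; the proofs are below) =====
def Claim_equal_create_latin_english_dict : Prop := ∀ (english_latin_dict : List (String × List String)), Dom_create_latin_english_dict english_latin_dict → Spec_create_latin_english_dict english_latin_dict (create_latin_english_dict english_latin_dict)

-- ===== LEMMAS AND PROOFS =====

def pvPairs (xs : List (String × List String)) : List (String × String) :=
  xs.flatMap (fun pr => pr.2.map (fun latin => (latin, pr.1)))

def pvEng (xs : List (String × List String)) (k : String) : List String :=
  ((pvPairs xs).filter (fun p => p.1 == k)).map (fun p => p.2)

def pvCanon (xs : List (String × List String)) : List (String × List String) :=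
  (PySem.List.sorted (PySem.List.dedup ((pvPairs xs).map (fun p => p.1))) (fun k => k)).map
    (fun k => (k, PySem.List.sorted (pvEng xs k) (fun x => x)))

theorem pv_lex_SS (xs : List (String × String)) :
    PySem.List.sorted2 xs (fun p => p.1) (fun p => p.2)
    = PySem.List.sorted xs (fun p => toLex (p.1, p.2)) := by
  unfold PySem.List.sorted2 PySem.List.sorted
  simp only [if_neg (by decide : ¬ (false = true))]
  congr 1
  funext acc x
  congr 1
  funext a b
  rcases lt_trichotomy (a.1) (b.1) with h | h | h
  · simp [Prod.Lex.lt_iff, h, not_lt.2 h.le]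
  · simp [Prod.Lex.lt_iff, h]
  · simp [Prod.Lex.lt_iff, h, not_lt.2 h.le, h.ne']

theorem pv_lex_SL (xs : List (String × List String)) :
    PySem.List.sorted2 xs (fun p => p.1) (fun p => p.2)
    = PySem.List.sorted xs (fun p => toLex (p.1, p.2)) := by
  unfold PySem.List.sorted2 PySem.List.sorted
  simp only [if_neg (by decide : ¬ (false = true))]
  congr 1
  funext acc x
  congr 1
  funext a b
  rcases lt_trichotomy (a.1) (b.1) with h | h | h
  · simp [Prod.Lex.lt_iff, h, not_lt.2 h.le]
  · simp [Prod.Lex.lt_iff, h]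
  · simp [Prod.Lex.lt_iff, h, not_lt.2 h.le, h.ne']

theorem pv_stepA_eq {d : PySem.Dict String (List String)} (l e : String) :
    (let d' := if d.contains l then d else d.insert l ([] : List String)
     d'.modify l [] (fun v => v ++ [e])) = d.modify l [] (fun v => v ++ [e]) := by
  by_cases h : d.contains l
  · simp [h]
  · simp only [Bool.not_eq_true] at h
    simp [h, PySem.Dict.modify, PySem.Dict.getD_insert_self, PySem.Dict.insert_insert_self,
      PySem.Dict.getD_of_not_contains d [] h]

theorem pv_loopA_eq (xs : List (String × List String)) (init : PySem.Dict String (List String)) :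
    xs.foldl (fun d pr =>
      pr.2.foldl (fun d latin_word =>
        let d' := if d.contains latin_word then d else d.insert latin_word ([] : List String)
        d'.modify latin_word [] (fun v => v ++ [pr.1])) d) init
    = (pvPairs xs).foldl (fun d p => d.modify p.1 [] (fun v => v ++ [p.2])) init := by
  induction xs generalizing init with
  | nil => rfl
  | cons pr t ih =>
    simp only [pvPairs, List.foldl_cons, List.flatMap_cons, List.foldl_append]
    rw [← pvPairs, ih]
    congr 1
    rw [List.foldl_map]
    congr 1
    funext d lw
    exact pv_stepA_eq lw pr.1

theorem pv_getD_fold_modify {κ ν : Type} [BEq κ] [LawfulBEq κ] [DecidableEq κ]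
    (ks : List κ) (hnd : ks.Nodup) (d : PySem.Dict κ ν) (d0 : ν) (f : ν → ν) (j : κ) :
    (ks.foldl (fun dd k => dd.modify k d0 f) d).getD j d0
    = if j ∈ ks then f (d.getD j d0) else d.getD j d0 := by
  induction ks generalizing d with
  | nil => simp
  | cons k t ih =>
    simp only [List.foldl_cons, List.mem_cons]
    rw [ih (hnd.of_cons)]
    rcases List.nodup_cons.1 hnd with ⟨hk, _⟩
    by_cases hjt : j ∈ t
    · have : j ≠ k := fun hh => hk (hh ▸ hjt)
      simp [hjt, PySem.Dict.getD_modify, this]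
    · by_cases hjk : j = k <;> simp [hjt, hjk, PySem.Dict.getD_modify, hk]

theorem pv_ofList_sublist {α : Type} [BEq α] [LawfulBEq α] (xs : List α) :
    (PySem.Set.ofList xs).Sublist xs := by
  induction xs using List.reverseRecOn with
  | nil => simp [PySem.Set.ofList, PySem.Set.empty]
  | append_singleton t x ih =>
    rw [PySem.Set.ofList_append, PySem.Set.update_cons, PySem.Set.update_nil]
    by_cases h : x ∈ PySem.Set.ofList t
    · simp [PySem.Set.add, h]
      exact ih.trans (List.sublist_append_left t [x])
    · simp [PySem.Set.add, h]
      exact ih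

theorem pv_update_self {α : Type} [BEq α] [LawfulBEq α] (s : PySem.Set α) :
    PySem.Set.update s s = s := by
  rw [PySem.Set.update_eq_append_filter]
  have h : (PySem.Set.ofList s).filter (fun y => !s.contains y) = [] := by
    rw [List.filter_eq_nil_iff]
    intro y hy
    rw [PySem.Set.mem_ofList] at hy
    simp [hy]
  rw [h, List.append_nil]

theorem pv_fold_keys (l : List (String × String)) :
    (l.foldl (fun d p => d.modify p.1 [] (fun v => v ++ [p.2])) PySem.Dict.empty).keys
    = PySem.Set.ofList (l.map (fun p => p.1)) := by
  rw [PySem.Dict.keys_foldl_modify_key l (fun p => p.1) [] (fun _ p v => v ++ [p.2])]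
  simp [PySem.Set.update_nil_left, PySem.Dict.keys_empty]

theorem pv_fold_getD (l : List (String × String)) (k : String) :
    (l.foldl (fun d p => d.modify p.1 [] (fun v => v ++ [p.2])) PySem.Dict.empty).getD k []
    = (l.filter (fun p => p.1 == k)).map (fun p => p.2) := by
  rw [PySem.Dict.getD_foldl_modify_append l PySem.Dict.empty k]
  simp [PySem.Dict.getD_empty]

theorem pv_items_fold (l : List (String × String)) :
    (l.foldl (fun d p => d.modify p.1 [] (fun v => v ++ [p.2])) PySem.Dict.empty).items
    = (PySem.List.dedup (l.map (fun p => p.1))).map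
        (fun k => (k, (l.filter (fun p => p.1 == k)).map (fun p => p.2))) := by
  have hnd : (l.foldl (fun d p => d.modify p.1 [] (fun v => v ++ [p.2])) PySem.Dict.empty).keys.Nodup := by
    rw [pv_fold_keys]; exact PySem.Set.nodup_ofList _
  rw [PySem.Dict.items_eq_map_keys _ hnd ([] : List String), pv_fold_keys, PySem.List.dedup]
  apply List.map_congr_left
  intro k hk
  rw [pv_fold_getD]

-- ============ A side ============
theorem pv_A_eq (xs : List (String × List String)) :
    create_latin_english_dict xs = pvCanon xs := by
  have hA : create_latin_english_dict xs
      = PySem.List.sorted2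
          (((pvPairs xs).foldl (fun d p => d.modify p.1 [] (fun v => v ++ [p.2])) PySem.Dict.empty).keys.foldl
            (fun dd k => dd.modify k [] (fun v => PySem.List.sorted v (fun x => x)))
            ((pvPairs xs).foldl (fun d p => d.modify p.1 [] (fun v => v ++ [p.2])) PySem.Dict.empty)).items
          (fun p => p.1) (fun p => p.2) := by
    unfold create_latin_english_dict
    rw [pv_loopA_eq]
  rw [hA]
  have hnd : ((pvPairs xs).foldl (fun d p => d.modify p.1 [] (fun v => v ++ [p.2])) PySem.Dict.empty).keys.Nodup := by
    rw [pv_fold_keys]; exact PySem.Set.nodup_ofList _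
  have hk2 : (((pvPairs xs).foldl (fun d p => d.modify p.1 [] (fun v => v ++ [p.2])) PySem.Dict.empty).keys.foldl
        (fun dd k => dd.modify k [] (fun v => PySem.List.sorted v (fun x => x)))
        ((pvPairs xs).foldl (fun d p => d.modify p.1 [] (fun v => v ++ [p.2])) PySem.Dict.empty)).keys
      = ((pvPairs xs).foldl (fun d p => d.modify p.1 [] (fun v => v ++ [p.2])) PySem.Dict.empty).keys := by
    rw [PySem.Dict.keys_foldl_modify_key _ (fun k => k) [] (fun _ _ v => PySem.List.sorted v (fun x => x))]
    rw [List.map_id']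
    exact pv_update_self _
  have hnd2 := hk2 ▸ hnd
  have hitems : (((pvPairs xs).foldl (fun d p => d.modify p.1 [] (fun v => v ++ [p.2])) PySem.Dict.empty).keys.foldl
        (fun dd k => dd.modify k [] (fun v => PySem.List.sorted v (fun x => x)))
        ((pvPairs xs).foldl (fun d p => d.modify p.1 [] (fun v => v ++ [p.2])) PySem.Dict.empty)).items
      = ((pvPairs xs).foldl (fun d p => d.modify p.1 [] (fun v => v ++ [p.2])) PySem.Dict.empty).keys.map
          (fun k => (k, PySem.List.sorted (pvEng xs k) (fun x => x))) := by
    rw [PySem.Dict.items_eq_map_keys _ hnd2 ([] : List String), hk2]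
    apply List.map_congr_left
    intro k hkmem
    rw [pv_getD_fold_modify _ hnd, if_pos hkmem, pv_fold_getD]
    rfl
  rw [hitems, pv_lex_SL]
  apply PySem.List.sorted_eq_of_perm_of_pairwise_lt
  · unfold pvCanon
    rw [pv_fold_keys, PySem.List.dedup]
    exact (PySem.List.sorted_perm _ _ _).map _
  · unfold pvCanon
    rw [List.pairwise_map]
    have := PySem.List.sorted_ofList_pairwise_lt ((pvPairs xs).map (fun p => p.1))
    rw [PySem.List.dedup]
    refine this.imp ?_
    intro a b hab
    rw [Prod.Lex.lt_iff]
    exact Or.inl hab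


-- ============ B side ============
theorem pv_B_eq (xs : List (String × List String)) :
    create_latin_english_dict_alt xs = pvCanon xs := by
  have hB : create_latin_english_dict_alt xs
      = ((PySem.List.sorted2 (pvPairs xs) (fun p => p.1) (fun p => p.2)).foldl
          (fun d p => d.modify p.1 [] (fun v => v ++ [p.2])) PySem.Dict.empty).items := rfl
  rw [hB, pv_items_fold, pv_lex_SS]
  have hSperm : (PySem.List.sorted (pvPairs xs) (fun p => toLex (p.1, p.2))).Perm (pvPairs xs) :=
    PySem.List.sorted_perm _ _ _
  have hSpair : (PySem.List.sorted (pvPairs xs) (fun p => toLex (p.1, p.2))).Pairwise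
      (fun a b => toLex (a.1, a.2) ≤ toLex (b.1, b.2)) :=
    PySem.List.sorted_pairwise _ _
  have hK : PySem.List.dedup ((PySem.List.sorted (pvPairs xs) (fun p => toLex (p.1, p.2))).map (fun p => p.1))
      = PySem.List.sorted (PySem.List.dedup ((pvPairs xs).map (fun p => p.1))) (fun k => k) := by
    symm
    rw [PySem.List.dedup, PySem.List.dedup]
    apply PySem.List.sorted_eq_of_perm_of_pairwise_lt
    · rw [List.perm_ext_iff_of_nodup (PySem.Set.nodup_ofList _) (PySem.Set.nodup_ofList _)]
      intro a
      rw [PySem.Set.mem_ofList, PySem.Set.mem_ofList, (hSperm.map (fun p => p.1)).mem_iff]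
    · have hle : ((PySem.List.sorted (pvPairs xs) (fun p => toLex (p.1, p.2))).map (fun p => p.1)).Pairwise (· ≤ ·) := by
        rw [List.pairwise_map]
        refine hSpair.imp ?_
        intro a b hab
        rcases Prod.Lex.le_iff.1 hab with h | h
        · exact le_of_lt h
        · exact le_of_eq h.1
      have hle' := hle.sublist (pv_ofList_sublist _)
      have hne : (PySem.Set.ofList ((PySem.List.sorted (pvPairs xs) (fun p => toLex (p.1, p.2))).map (fun p => p.1))).Pairwise (· ≠ ·) :=
        PySem.Set.nodup_ofList _
      exact (hle'.and hne).imp (fun h => lt_of_le_of_ne h.1 h.2)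
  rw [hK]
  unfold pvCanon
  apply List.map_congr_left
  intro k hkmem
  have hE : ((PySem.List.sorted (pvPairs xs) (fun p => toLex (p.1, p.2))).filter (fun p => p.1 == k)).map (fun p => p.2)
      = PySem.List.sorted (pvEng xs k) (fun x => x) := by
    symm
    apply PySem.List.sorted_id_eq_of_perm_of_pairwise
    · exact ((hSperm.filter _).map _)
    · rw [List.pairwise_map]
      have hfil := hSpair.sublist (List.filter_sublist (p := fun p => p.1 == k))
      refine hfil.imp_of_mem ?_
      intro a b ha hb hab
      have hak : a.1 = k := by simpa using (List.mem_filter.1 ha).2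
      have hbk : b.1 = k := by simpa using (List.mem_filter.1 hb).2
      rcases Prod.Lex.le_iff.1 hab with h | h
      · rw [hak, hbk] at h; exact absurd h (lt_irrefl k)
      · exact h.2
  rw [hE]

-- ===== VERDICT (by name: the statement is the Claim_ definition above) =====
theorem create_latin_english_dict_spec : Claim_equal_create_latin_english_dict := by
  intro xs _
  unfold Spec_create_latin_english_dict
  rw [pv_A_eq, pv_B_eq]
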